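-- pv_equiv track=rewrite | github.com/Vogelspinnetje/DataStructures-Algorithms | combined.py | switches
-- ===== SOURCE A (Python) =====
-- def switches(binary_list: list[int]) -> int:
--     """
--     Determines the minimum number of switches (from 1 to 0 or vice versa)
--     needed to make all zeros in the list contiguous, considering the list as circular.
--
--     Constraints:
--         - 1 ≤ length of list ≤ 10^5
--         - list[i] is either 0 or 1
--         - Runtime < 1 minute
--
--     Args:
--         binary_list (list[int]): A list of zeros and ones.
--
--     Returns:
--         int: The minimum number of switches required.
--     """
--     if len(binary_list) == 1:
--         return 0
--
--     zero_count = binary_list.count(0)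
--     max_zeros_in_window = binary_list[:zero_count].count(0)
--     zeros_in_window = max_zeros_in_window
--
--     circular_list = binary_list + binary_list[:zero_count]
--
--     for i in range(zero_count, len(binary_list) + zero_count):
--         if circular_list[i] == 0:
--             zeros_in_window += 1
--         if circular_list[i - zero_count] == 0:
--             zeros_in_window -= 1
--         max_zeros_in_window = max(max_zeros_in_window, zeros_in_window)
--
--     return zero_count - max_zeros_in_window
-- ===== SOURCE B (Python) =====
-- def switches(binary_list: list[int]) -> int:
--     """Prefix-sum table over the doubled list instead of an incremental sliding window."""
--     n = len(binary_list)
--     zero_count = binary_list.count(0)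
--     doubled = binary_list + binary_list[:zero_count]
--     prefix = [0]
--     for x in doubled:
--         prefix.append(prefix[-1] + (1 if x == 0 else 0))
--     best = 0
--     for start in range(n):
--         zeros_in_window = prefix[start + zero_count] - prefix[start]
--         if zeros_in_window > best:
--             best = zeros_in_window
--     return zero_count - best
-- ===== Notes on version B (the rewrite author's own statement) =====
-- stated objective: alternative
-- what changed: A's incremental sliding window (add the entering element, subtract the leaving one, over windows starting at 0..n) is replaced by a prefix-sum table of zero counts over the doubled list, with an independent lookup scan over start positions 0..n-1 and no length-1 or incremental special-casing.
import Mathlib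
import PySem

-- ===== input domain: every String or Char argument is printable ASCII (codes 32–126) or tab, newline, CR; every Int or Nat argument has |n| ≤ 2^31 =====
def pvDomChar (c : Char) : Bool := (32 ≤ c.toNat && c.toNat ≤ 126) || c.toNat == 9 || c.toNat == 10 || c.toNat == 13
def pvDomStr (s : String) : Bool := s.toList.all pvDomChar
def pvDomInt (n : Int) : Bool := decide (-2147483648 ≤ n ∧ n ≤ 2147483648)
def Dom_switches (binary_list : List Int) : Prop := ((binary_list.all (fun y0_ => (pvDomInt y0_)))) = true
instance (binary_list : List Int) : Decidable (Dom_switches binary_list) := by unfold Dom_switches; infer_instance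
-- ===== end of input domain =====

-- ===== PORT A =====
-- B replaces A's incremental add/subtract sliding window by a prefix-sum table plus a lookup scan (objective: alternative).
-- Port of A. Indices into circular_list are always in range; `pyGet? … = some 0` is Python's `circular_list[i] == 0`.
def switches (binary_list : List Int) : Int :=
  if binary_list.length = 1 then 0
  else
    let zero_count : Int := (PySem.List.count binary_list 0 : Int)
    let max_zeros_in_window : Int :=
      (PySem.List.count (PySem.List.slice binary_list none (some zero_count)) 0 : Int)
    let circular_list := binary_list ++ PySem.List.slice binary_list none (some zero_count)
    let st :=
      (PySem.List.pyRange zero_count ((binary_list.length : Int) + zero_count) 1).foldl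
        (fun (s : Int × Int) i =>
          let z := if PySem.List.pyGet? circular_list i = some 0 then s.1 + 1 else s.1
          let z2 := if PySem.List.pyGet? circular_list (i - zero_count) = some 0 then z - 1 else z
          (z2, max s.2 z2))
        (max_zeros_in_window, max_zeros_in_window)
    zero_count - st.2

-- ===== PORT B =====
-- Port of B (Source B): prefix-sum table over the doubled list, then a lookup scan over start positions.
-- `pyGetD p (-1) 0` is Python's `prefix[-1]` (the table is never empty); the other lookups are always in range.
def switches_alt (binary_list : List Int) : Int :=
  let n : Int := (binary_list.length : Int)
  let zero_count : Int := (PySem.List.count binary_list 0 : Int)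
  let doubled := binary_list ++ PySem.List.slice binary_list none (some zero_count)
  let pref := doubled.foldl
    (fun (p : List Int) x => p ++ [PySem.List.pyGetD p (-1) 0 + (if x = 0 then 1 else 0)])
    [0]
  let best := (PySem.List.pyRange 0 n 1).foldl
    (fun (b : Int) start =>
      let zeros_in_window :=
        PySem.List.pyGetD pref (start + zero_count) 0 - PySem.List.pyGetD pref start 0
      if zeros_in_window > b then zeros_in_window else b)
    0
  zero_count - best

-- ===== PRECONDITION & SPEC =====
def Spec_switches (binary_list : List Int) (out : Int) : Prop := out = switches_alt binary_list
instance (binary_list : List Int) (out : Int) : Decidable (Spec_switches binary_list out) := by unfold Spec_switches; infer_instance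

-- ===== CLAIM (what is proved, stated in full; the proofs are below) =====
def Claim_equal_switches : Prop := ∀ (binary_list : List Int), Dom_switches binary_list → Spec_switches binary_list (switches binary_list)

-- ===== LEMMAS AND PROOFS =====

-- number of zeros in the window of length k starting at position s of c
def pvW (c : List Int) (k s : Nat) : Int := (List.count 0 ((c.drop s).take k) : Int)

-- running maximum of the windows 0..t (A's loop state)
def pvM (c : List Int) (k : Nat) : Nat → Int
  | 0 => pvW c k 0
  | t+1 => max (pvM c k t) (pvW c k (t+1))

-- running maximum of the windows 0..t-1 folded with 0 (B's loop state)
def pvN (c : List Int) (k : Nat) : Nat → Int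
  | 0 => 0
  | t+1 => max (pvN c k t) (pvW c k t)

lemma pvW_nonneg (c : List Int) (k s : Nat) : 0 ≤ pvW c k s := by simp [pvW]

lemma pvW_zero_le_pvM (c : List Int) (k : Nat) : ∀ t, pvW c k 0 ≤ pvM c k t := by
  intro t
  induction t with
  | zero => exact le_refl _
  | succ t ih => exact le_trans ih (le_max_left _ _)

-- the sliding-window identity behind A's incremental update
lemma pv_slide (c : List Int) (k t : Nat) (x y : Int)
    (hx : (c)[t+k]? = some x) (hy : (c)[t]? = some y) :
    pvW c k (t+1) = pvW c k t + (if x = 0 then 1 else 0) - (if y = 0 then 1 else 0) := by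
  obtain ⟨htk, hxe⟩ := List.getElem?_eq_some_iff.mp hx
  obtain ⟨ht, hye⟩ := List.getElem?_eq_some_iff.mp hy
  have h1 : (c.drop t).take (k+1) = (c.drop t).take k ++ [x] := by
    rw [List.take_add_one]
    have h : (c.drop t)[k]? = some x := by
      rw [List.getElem?_drop, hx]
    rw [h]; rfl
  have h2 : c.drop t = y :: c.drop (t+1) := by
    have := List.drop_eq_getElem_cons ht
    simpa [hye] using this
  have hcount : List.count 0 ((c.drop t).take k) + (if x = 0 then 1 else 0)
      = (if y = 0 then 1 else 0) + List.count 0 ((c.drop (t+1)).take k) := by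
    have h3 := congrArg (List.count 0) (h1.symm.trans (by rw [h2, List.take_succ_cons]))
    simpa [List.count_append, List.count_cons, List.count_singleton, beq_iff_eq,
      Nat.add_comm] using h3
  simp only [pvW]
  by_cases hx0 : x = 0 <;> by_cases hy0 : y = 0 <;>
    simp only [hx0, hy0, if_pos, if_false] at hcount ⊢ <;> omega

-- characterisation of A's loop: state after t steps is (window t, max of windows 0..t)
lemma pvA_fold (c : List Int) (k : Nat) :
    ∀ t : Nat, t + k ≤ c.length →
    (PySem.List.pyRange (k:Int) ((k:Int) + (t:Int)) 1).foldl
      (fun (s : Int × Int) i =>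
        let z := if PySem.List.pyGet? c i = some 0 then s.1 + 1 else s.1
        let z2 := if PySem.List.pyGet? c (i - (k:Int)) = some 0 then z - 1 else z
        (z2, max s.2 z2))
      (pvW c k 0, pvW c k 0)
    = (pvW c k t, pvM c k t) := by
  intro t
  induction t with
  | zero =>
      intro _
      rw [show ((k:Int) + (0:Nat) : Int) = (k:Int) by norm_num]
      rw [PySem.List.pyRange_one_eq_nil (le_refl _)]
      simp [pvM]
  | succ t ih =>
      intro h
      have h' : t + k ≤ c.length := by omega
      have hlt : t + k < c.length := by omega
      have hlt2 : t < c.length := by omega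
      rw [show ((k:Int) + ((t+1:Nat) : Int)) = ((k:Int) + (t:Int)) + 1 by push_cast; ring]
      rw [PySem.List.pyRange_one_succ_right (by omega)]
      rw [List.foldl_append, ih h']
      simp only [List.foldl_cons, List.foldl_nil]
      have e1 : PySem.List.pyGet? c ((k:Int) + (t:Int)) = (c)[t+k]? := by
        rw [show ((k:Int) + (t:Int)) = ((t + k : Nat) : Int) by push_cast; ring,
          PySem.List.pyGet?_natCast]
      have e2 : PySem.List.pyGet? c ((k:Int) + (t:Int) - (k:Int)) = (c)[t]? := by
        rw [show ((k:Int) + (t:Int) - (k:Int)) = ((t : Nat) : Int) by push_cast; ring,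
          PySem.List.pyGet?_natCast]
      have hx : (c)[t+k]? = some (c.get ⟨t+k, hlt⟩) := by
        simp [List.getElem?_eq_getElem hlt]
      have hy : (c)[t]? = some (c.get ⟨t, hlt2⟩) := by
        simp [List.getElem?_eq_getElem hlt2]
      rw [e1, e2, hx, hy]
      have hs := pv_slide c k t _ _ hx hy
      have hz : (if c.get ⟨t+k, hlt⟩ = 0 then pvW c k t + 1 else pvW c k t) -
          (if c.get ⟨t, hlt2⟩ = 0 then 1 else 0) = pvW c k (t+1) := by
        by_cases h1 : c.get ⟨t+k, hlt⟩ = 0 <;> by_cases h2 : c.get ⟨t, hlt2⟩ = 0 <;>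
          simp [h1, h2] at hs ⊢ <;> omega
      simp only [Option.some.injEq, Prod.mk.injEq]
      constructor
      · by_cases h1 : c.get ⟨t+k, hlt⟩ = 0 <;> by_cases h2 : c.get ⟨t, hlt2⟩ = 0 <;>
          simp only [if_pos, if_false] at hz ⊢ <;>
          (try simp at hz ⊢) <;> omega
      · show max (pvM c k t) _ = pvM c k (t+1)
        have hm : pvM c k (t+1) = max (pvM c k t) (pvW c k (t+1)) := rfl
        rw [hm]
        congr 1
        by_cases h1 : c.get ⟨t+k, hlt⟩ = 0 <;> by_cases h2 : c.get ⟨t, hlt2⟩ = 0 <;>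
          simp only [if_pos, if_false] at hz ⊢ <;>
          (try simp at hz ⊢) <;> omega

-- B's prefix table, with a generalised accumulator
lemma pv_pref_gen (c : List Int) :
    ∀ (p : List Int) (a : Int), p.getLast? = some a →
    c.foldl (fun (p : List Int) x => p ++ [PySem.List.pyGetD p (-1) 0 + (if x = 0 then 1 else 0)]) p
      = p ++ (List.range c.length).map (fun j => a + (List.count 0 (c.take (j+1)) : Int)) := by
  induction c with
  | nil => intro p a _; simp
  | cons v c ih =>
      intro p a hp
      have hne : p ≠ [] := by
        intro h; rw [h] at hp; simp at hp
      have hlast : PySem.List.pyGetD p (-1) 0 = a := by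
        rw [PySem.List.pyGetD_neg_one p 0 hne]
        exact Option.some_injective _ ((List.getLast?_eq_some_getLast hne).symm.trans hp)
      rw [List.foldl_cons, hlast]
      rw [ih (p ++ [a + (if v = 0 then 1 else 0)]) (a + (if v = 0 then 1 else 0))
        List.getLast?_concat]
      rw [List.append_assoc]
      congr 1
      rw [List.length_cons, List.range_succ_eq_map]
      simp only [List.map_cons, List.map_map]
      rw [List.singleton_append]
      congr 1
      · simp only [List.take_succ_cons, List.take_zero, List.count_cons, List.count_nil]
        by_cases hv : v = 0 <;> simp [hv]
      · apply List.map_congr_left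
        intro j hj
        simp only [Function.comp_apply]
        have hts : (v :: c).take (Nat.succ j + 1) = v :: c.take (j+1) := rfl
        rw [hts, List.count_cons]
        by_cases hv : v = 0 <;> simp [hv] <;> ring

-- B's table lookup: entry j of the prefix table is the number of zeros among the first j elements
lemma pv_pref_get (c : List Int) (j : Nat) (hj : j ≤ c.length) :
    (c.foldl (fun (p : List Int) x => p ++ [PySem.List.pyGetD p (-1) 0 + (if x = 0 then 1 else 0)]) [0]).getD j 0
      = (List.count 0 (c.take j) : Int) := by
  rw [pv_pref_gen c [0] 0 rfl]
  cases j with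
  | zero => simp
  | succ j =>
      have hj' : j < c.length := by omega
      rw [show ([(0:Int)] ++ (List.range c.length).map (fun j => 0 + (List.count 0 (c.take (j+1)) : Int)))
        = (0:Int) :: (List.range c.length).map (fun j => 0 + (List.count 0 (c.take (j+1)) : Int)) from List.singleton_append]
      simp only [List.getD_cons_succ]
      simp [List.getD, List.getElem?_map, List.getElem?_range hj']

-- characterisation of B's loop: after t steps, best = 0 ⊔ max of windows 0..t-1
lemma pvB_fold (c : List Int) (k : Nat) :
    ∀ t : Nat, t + k ≤ c.length →
    (PySem.List.pyRange 0 (t:Int) 1).foldl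
      (fun (b : Int) start =>
        let zeros_in_window :=
          PySem.List.pyGetD (c.foldl (fun (p : List Int) x => p ++ [PySem.List.pyGetD p (-1) 0 + (if x = 0 then 1 else 0)]) [0]) (start + (k:Int)) 0
          - PySem.List.pyGetD (c.foldl (fun (p : List Int) x => p ++ [PySem.List.pyGetD p (-1) 0 + (if x = 0 then 1 else 0)]) [0]) start 0
        if zeros_in_window > b then zeros_in_window else b)
      0
    = pvN c k t := by
  intro t
  induction t with
  | zero =>
      intro _
      rw [show ((0:Nat):Int) = (0:Int) by norm_num]
      rw [PySem.List.pyRange_one_eq_nil (le_refl _)]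
      rfl
  | succ t ih =>
      intro h
      have h' : t + k ≤ c.length := by omega
      rw [show (((t+1:Nat)):Int) = ((t:Nat):Int) + 1 by push_cast; ring]
      rw [PySem.List.pyRange_one_succ_right (by positivity)]
      rw [List.foldl_append, ih h']
      simp only [List.foldl_cons, List.foldl_nil]
      have e1 : ((t:Nat):Int) + (k:Int) = (((t+k:Nat)):Int) := by push_cast; ring
      rw [e1, PySem.List.pyGetD_natCast, PySem.List.pyGetD_natCast]
      rw [pv_pref_get c (t+k) h', pv_pref_get c t (by omega)]
      have hz : (List.count 0 (c.take (t+k)) : Int) - (List.count 0 (c.take t) : Int) = pvW c k t := by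
        have hta : c.take (t+k) = c.take t ++ (c.drop t).take k := List.take_add
        rw [hta, List.count_append]
        simp [pvW]
      rw [hz]
      show (if pvW c k t > pvN c k t then pvW c k t else pvN c k t) = max (pvN c k t) (pvW c k t)
      rcases le_or_gt (pvW c k t) (pvN c k t) with hle | hlt
      · rw [if_neg (by omega), max_eq_left hle]
      · rw [if_pos hlt, max_eq_right (le_of_lt hlt)]

lemma pvN_succ_eq (c : List Int) (k : Nat) : ∀ t, pvN c k (t+1) = max 0 (pvM c k t) := by
  intro t
  induction t with
  | zero => simp [pvN, pvM]
  | succ t ih =>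
      show max (pvN c k (t+1)) (pvW c k (t+1)) = _
      rw [ih]
      show _ = max 0 (max (pvM c k t) (pvW c k (t+1)))
      rw [max_assoc]

-- circularity: the window starting at position n of l ++ l.take k equals the window starting at 0
lemma pv_window_wrap (l : List Int) (k : Nat) (hk : k ≤ l.length) :
    pvW (l ++ l.take k) k l.length = pvW (l ++ l.take k) k 0 := by
  simp only [pvW, List.drop_zero, List.drop_left]
  rw [List.take_take, min_self, List.take_append_of_le_length hk]

theorem pv_main (l : List Int) : switches l = switches_alt l := by
  have hk : List.count 0 l ≤ l.length := List.count_le_length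
  have hclen : (l ++ l.take (List.count 0 l)).length = l.length + List.count 0 l := by
    simp [List.length_take, min_eq_left hk]
  have hW0 : pvW (l ++ l.take (List.count 0 l)) (List.count 0 l) 0
      = (List.count 0 (l.take (List.count 0 l)) : Int) := by
    simp [pvW, List.take_append_of_le_length hk]
  have hB : switches_alt l = (List.count 0 l : Int)
      - pvN (l ++ l.take (List.count 0 l)) (List.count 0 l) l.length := by
    simp only [switches_alt, PySem.List.count_eq, PySem.List.slice_to_natCast]
    rw [pvB_fold _ _ l.length (le_of_eq hclen.symm)]
  by_cases hn1 : l.length = 1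
  · have hA : switches l = 0 := by simp [switches, hn1]
    rw [hA, hB, hn1]
    have h1 : pvN (l ++ l.take (List.count 0 l)) (List.count 0 l) 1
        = max 0 (pvW (l ++ l.take (List.count 0 l)) (List.count 0 l) 0) := by
      rw [pvN_succ_eq]; rfl
    rw [h1, hW0]
    rcases Nat.le_one_iff_eq_zero_or_eq_one.mp (by omega : List.count 0 l ≤ 1) with h0 | h01
    · simp [h0]
    · have ht : l.take 1 = l := List.take_of_length_le (by omega)
      rw [h01, ht, h01]
      simp
  · by_cases hn0 : l.length = 0
    · have hnil : l = [] := List.length_eq_zero_iff.mp hn0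
      subst hnil
      decide
    · obtain ⟨m, hm⟩ : ∃ m, l.length = m + 1 := ⟨l.length - 1, by omega⟩
      have hA : switches l = (List.count 0 l : Int)
          - pvM (l ++ l.take (List.count 0 l)) (List.count 0 l) l.length := by
        simp only [switches, if_neg hn1, PySem.List.count_eq, PySem.List.slice_to_natCast]
        rw [show ((l.length:Int) + ((List.count 0 l : Nat) : Int))
          = (((List.count 0 l : Nat)) : Int) + ((l.length : Nat) : Int) by ring]
        rw [← hW0]
        rw [pvA_fold _ _ l.length (le_of_eq hclen.symm)]
      rw [hA, hB]
      congr 1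
      have h2 : max 0 (pvM (l ++ l.take (List.count 0 l)) (List.count 0 l) m)
          = pvM (l ++ l.take (List.count 0 l)) (List.count 0 l) m :=
        max_eq_right (le_trans (pvW_nonneg _ _ 0) (pvW_zero_le_pvM _ _ m))
      have h4 : pvW (l ++ l.take (List.count 0 l)) (List.count 0 l) (m+1)
          ≤ pvM (l ++ l.take (List.count 0 l)) (List.count 0 l) m := by
        rw [← hm, pv_window_wrap l _ hk]
        exact pvW_zero_le_pvM _ _ m
      have h5 : pvM (l ++ l.take (List.count 0 l)) (List.count 0 l) (m+1)
          = pvM (l ++ l.take (List.count 0 l)) (List.count 0 l) m := by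
        show max _ _ = _
        exact max_eq_left h4
      rw [hm, h5, pvN_succ_eq, h2]

-- ===== VERDICT (by name: the statement is the Claim_ definition above) =====
theorem switches_spec : Claim_equal_switches := by
  intro binary_list _
  show switches binary_list = switches_alt binary_list
  exact pv_main binary_list
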